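-- pv_equiv track=rewrite | github.com/SWeszler/google-kickstart | 2021_B/B1/b1.py | solution
-- ===== SOURCE A (Python) =====
-- def solution(N, S):
--     store = {}
--     count = 1
--     for i in range(N):
--         if i > 0 and ord(S[i]) > ord(S[i - 1]):
--             count += 1
--         else:
--             count = 1
--         store[i] = count
--
--     return " ".join([str(i) for i in store.values()])
-- ===== SOURCE B (Python) =====
-- def solution(N, S):
--     parts = []
--     i = 0
--     while i < N:
--         j = i
--         while j + 1 < N and ord(S[j + 1]) > ord(S[j]):
--             j += 1
--         for k in range(1, j - i + 2):
--             parts.append(str(k))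
--         i = j + 1
--     return " ".join(parts)
-- ===== Notes on version B (the rewrite author's own statement) =====
-- stated objective: alternative
-- what changed: Replaces the dict-accumulating single pass that tracks a running count per index with a run-scanner: an outer index jumps from run start to run start, an inner loop finds each maximal increasing run's end, and the block '1 2 ... runlen' is emitted at once; no dict and no per-index counter state.
import Mathlib
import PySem

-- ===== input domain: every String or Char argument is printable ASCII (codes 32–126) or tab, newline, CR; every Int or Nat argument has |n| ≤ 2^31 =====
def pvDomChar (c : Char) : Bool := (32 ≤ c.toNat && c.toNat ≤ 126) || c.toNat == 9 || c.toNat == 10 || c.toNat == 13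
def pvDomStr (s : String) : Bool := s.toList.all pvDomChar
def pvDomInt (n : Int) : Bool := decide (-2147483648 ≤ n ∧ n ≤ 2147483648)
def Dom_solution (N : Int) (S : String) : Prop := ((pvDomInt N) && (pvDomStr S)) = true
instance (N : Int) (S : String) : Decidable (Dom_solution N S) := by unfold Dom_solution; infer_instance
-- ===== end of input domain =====

-- B replaces A's per-index counter-with-dict pass by a run scanner that jumps from run start to
-- run start and emits each whole block "1 2 … runlen" at once (objective: alternative).

-- ===== PORT A =====
-- A: store = {}; count = 1; for i in range(N): count = count+1 if i>0 and ord(S[i])>ord(S[i-1]) else 1;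
--    store[i] = count; return " ".join(str(v) for v in store.values())
-- pyGetD with default ' ' is only reached outside Pre_solution (where Python raises IndexError).
def solution (N : Int) (S : String) : String :=
  let cs := S.toList
  let res := (PySem.List.pyRange 0 N 1).foldl
    (fun (st : PySem.Dict Int Int × Int) i =>
      let count := if i > 0 ∧ (PySem.List.pyGetD cs i ' ').toNat > (PySem.List.pyGetD cs (i-1) ' ').toNat
                   then st.2 + 1 else 1
      (st.1.insert i count, count))
    (PySem.Dict.empty, 1)
  PySem.Str.join " " (res.1.values.map (fun c => PySem.Int.toStr c))

-- ===== PORT B =====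
-- inner while loop: advance j while j+1 < N and ord(S[j+1]) > ord(S[j])
def pvRunEnd (cs : List Char) (N j : Int) : Int :=
  if h : j + 1 < N ∧ (PySem.List.pyGetD cs (j+1) ' ').toNat > (PySem.List.pyGetD cs j ' ').toNat
  then pvRunEnd cs N (j+1) else j
termination_by (N - j).toNat
decreasing_by omega

-- outer while loop: for each run start i, emit str(1)..str(runlen) and jump to j+1
theorem pvRunEnd_ge (cs : List Char) (N j : Int) : j ≤ pvRunEnd cs N j := by
  fun_induction pvRunEnd cs N j with
  | case1 j h ih => omega
  | case2 j h => omega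

def pvScan (cs : List Char) (N i : Int) (acc : List String) : List String :=
  if _h : i < N then
    let j := pvRunEnd cs N i
    pvScan cs N (j+1) (acc ++ (PySem.List.pyRange 1 (j - i + 2) 1).map (fun k => PySem.Int.toStr k))
  else acc
termination_by (N - i).toNat
decreasing_by have := pvRunEnd_ge cs N i; omega

def solution_alt (N : Int) (S : String) : String :=
  PySem.Str.join " " (pvScan S.toList N 0 [])

-- ===== PRECONDITION & SPEC =====
-- Pre_ excludes exactly the inputs where A raises IndexError: N ≥ 2 with fewer than N characters
-- (for N ≤ 1 the loop never indexes S, so A returns even on a short string).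
def Pre_solution (N : Int) (S : String) : Prop := N ≤ 1 ∨ N ≤ (S.toList.length : Int)
instance (N : Int) (S : String) : Decidable (Pre_solution N S) := by unfold Pre_solution; infer_instance
def pvWitness_solution : Int × String := (4, "abba")
def Spec_solution (N : Int) (S : String) (out : String) : Prop := out = solution_alt N S
instance (N : Int) (S : String) (out : String) : Decidable (Spec_solution N S out) := by unfold Spec_solution; infer_instance

-- ===== CLAIM (what is proved, stated in full; the proofs are below) =====
def Claim_equal_solution : Prop := ∀ (N : Int) (S : String), Dom_solution N S → Pre_solution N S → Spec_solution N S (solution N S)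

-- ===== LEMMAS AND PROOFS =====

-- the adjacent-character comparison both programs make at position i
def pvCmp (cs : List Char) (i : Int) : Prop :=
  (PySem.List.pyGetD cs i ' ').toNat > (PySem.List.pyGetD cs (i-1) ' ').toNat

-- A's count at index i, as a pure function of the input
def pvCountF (cs : List Char) (i : Int) : Int :=
  if h : 0 < i ∧ (PySem.List.pyGetD cs i ' ').toNat > (PySem.List.pyGetD cs (i-1) ' ').toNat
  then pvCountF cs (i-1) + 1 else 1
termination_by i.toNat
decreasing_by omega

-- A's fold step
def pvStepA (cs : List Char) (st : PySem.Dict Int Int × Int) (i : Int) : PySem.Dict Int Int × Int :=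
  let count := if i > 0 ∧ (PySem.List.pyGetD cs i ' ').toNat > (PySem.List.pyGetD cs (i-1) ' ').toNat
               then st.2 + 1 else 1
  (st.1.insert i count, count)

theorem pvCountF_unfold (cs : List Char) (i : Int) :
    pvCountF cs i
      = if 0 < i ∧ (PySem.List.pyGetD cs i ' ').toNat > (PySem.List.pyGetD cs (i-1) ' ').toNat
        then pvCountF cs (i-1) + 1 else 1 := by
  rw [pvCountF]; split_ifs with h <;> simp_all

-- A's fold builds items (i, pvCountF cs i) for i in [a, N)
theorem pvFoldA (cs : List Char) (N : Int) : ∀ (n : Nat) (a : Int) (d : PySem.Dict Int Int) (count : Int),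
    n = (N - a).toNat →
    (0 < a → count = pvCountF cs (a-1)) → (∀ k ∈ d.keys, k < a) →
    ((PySem.List.pyRange a N 1).foldl (pvStepA cs) (d, count)).1.items
      = d.items ++ (PySem.List.pyRange a N 1).map (fun i => (i, pvCountF cs i)) := by
  intro n
  induction n with
  | zero =>
    intro a d count hn _ _
    rw [PySem.List.pyRange_one_eq_nil (by omega)]
    simp
  | succ m ih =>
    intro a d count hn hc hk
    by_cases ha : a < N
    · rw [PySem.List.pyRange_one_cons ha]
      simp only [List.foldl_cons, List.map_cons]
      have hcount : (pvStepA cs (d, count) a).2 = pvCountF cs a := by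
        simp only [pvStepA, pvCountF_unfold cs a]
        split_ifs <;> first | rfl | omega
      have hnc : d.contains a = false := by
        cases hcon : d.contains a with
        | false => rfl
        | true =>
          exfalso
          have := (PySem.Dict.contains_iff_mem_keys (d := d) (k := a)).mp hcon
          exact absurd (hk a this) (by omega)
      have hstep1 : (pvStepA cs (d, count) a).1 = d.insert a (pvStepA cs (d, count) a).2 := by
        simp [pvStepA]
      have hih := ih (a+1) (pvStepA cs (d, count) a).1 (pvStepA cs (d, count) a).2 (by omega)
          (fun _ => by rw [hcount]; congr 1; omega)
          (by intro k hkmem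
              rw [hstep1] at hkmem
              rcases (PySem.Dict.mem_keys_insert _ _ _ _).mp hkmem with h | h
              · omega
              · have := hk k h; omega)
      rw [Prod.mk.eta] at hih
      rw [hih]
      rw [hstep1, PySem.Dict.items_insert_of_not_contains _ _ hnc, hcount]
      simp
    · rw [PySem.List.pyRange_one_eq_nil (by omega)]
      simp

theorem pvRunEnd_lt (cs : List Char) (N i : Int) (h : i < N) : pvRunEnd cs N i < N := by
  fun_induction pvRunEnd cs N i with
  | case1 j hj ih => exact ih (by omega)
  | case2 j hj => omega

theorem pvRunEnd_stop (cs : List Char) (N i : Int) :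
    ¬(pvRunEnd cs N i + 1 < N ∧ pvCmp cs (pvRunEnd cs N i + 1)) := by
  fun_induction pvRunEnd cs N i with
  | case1 j hj ih => exact ih
  | case2 j hj =>
    intro hcon
    apply hj
    refine ⟨hcon.1, ?_⟩
    have := hcon.2
    simp only [pvCmp] at this
    have he : j + 1 - 1 = j := by omega
    rw [he] at this
    exact this

theorem pvRunEnd_cmp (cs : List Char) (N i : Int) :
    ∀ k, i ≤ k → k < pvRunEnd cs N i → pvCmp cs (k+1) := by
  fun_induction pvRunEnd cs N i with
  | case1 j hj ih =>
    intro k hk1 hk2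
    by_cases he : k = j
    · subst he
      simp only [pvCmp]
      have he2 : k + 1 - 1 = k := by omega
      rw [he2]
      exact hj.2
    · exact ih k (by omega) hk2
  | case2 j hj =>
    intro k hk1 hk2
    omega

theorem pvCountF_run (cs : List Char) (N i : Int) (hi : 0 ≤ i) (hs : pvCountF cs i = 1) :
    ∀ (m : Nat), i + m ≤ pvRunEnd cs N i → pvCountF cs (i + m) = m + 1 := by
  intro m
  induction m with
  | zero => intro _; simpa using hs
  | succ p ih =>
    intro hle
    have hcmp : pvCmp cs (i + p + 1) := pvRunEnd_cmp cs N i (i + p) (by omega) (by omega)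
    have : pvCountF cs (i + (p+1 : Nat)) = pvCountF cs (i + (p+1 : Nat) - 1) + 1 := by
      rw [pvCountF_unfold]
      rw [if_pos ⟨by push_cast; omega, by have he : i + ((p:Int)+1) = i + p + 1 := by omega
                                          push_cast; rw [he]; exact hcmp⟩]
    rw [this]
    have he : i + ((p:Int)+1) - 1 = i + p := by omega
    push_cast
    push_cast at he ih ⊢
    rw [he, ih (by omega)]

theorem pvScanEq (cs : List Char) (N : Int) : ∀ (n : Nat) (i : Int) (acc : List String),
    (N - i).toNat ≤ n → 0 ≤ i → (i < N → pvCountF cs i = 1) →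
    pvScan cs N i acc
      = acc ++ (PySem.List.pyRange i N 1).map (fun k => PySem.Int.toStr (pvCountF cs k)) := by
  intro n
  induction n with
  | zero =>
    intro i acc hn _ _
    rw [pvScan, dif_neg (by omega), PySem.List.pyRange_one_eq_nil (by omega)]
    simp
  | succ m ih =>
    intro i acc hn hi0 hc1
    by_cases hiN : i < N
    · have hs := hc1 hiN
      rw [pvScan, dif_pos hiN]
      set j := pvRunEnd cs N i with hj
      have hij : i ≤ j := pvRunEnd_ge cs N i
      have hjN : j < N := pvRunEnd_lt cs N i hiN
      have hstop := pvRunEnd_stop cs N i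
      rw [ih (j+1) _ (by omega) (by omega)
          (by intro hj1N
              rw [pvCountF_unfold]
              rw [if_neg (by intro hcon; exact hstop ⟨hj1N, hcon.2⟩)])]
      rw [PySem.List.pyRange_one_append i (j+1) N (by omega) (by omega), List.map_append,
          ← List.append_assoc]
      congr 2
      rw [PySem.List.pyRange_one i (j+1), PySem.List.pyRange_one 1 (j-i+2), List.map_map,
          List.map_map]
      have hlen : (j + 1 - i).toNat = (j - i + 2 - 1).toNat := by omega
      rw [hlen]
      apply List.map_congr_left
      intro k hk
      have hk' : (k : Int) < j + 1 - i := by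
        have := List.mem_range.mp hk; omega
      simp only [Function.comp_apply]
      rw [pvCountF_run cs N i hi0 hs k (by omega)]
      congr 1
      omega
    · rw [pvScan, dif_neg hiN, PySem.List.pyRange_one_eq_nil (by omega)]
      simp

theorem pvValues_map (d : PySem.Dict Int Int) : d.values = d.items.map Prod.snd := rfl

theorem solution_eq (N : Int) (S : String) :
    solution N S
      = PySem.Str.join " " ((PySem.List.pyRange 0 N 1).map
          (fun i => PySem.Int.toStr (pvCountF S.toList i))) := by
  simp only [solution]
  congr 1
  have hfold := pvFoldA S.toList N (N - 0).toNat 0 PySem.Dict.empty 1 rfl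
      (by intro h; omega) (by intro k hk; simp [PySem.Dict.keys] at hk; exact absurd hk (by
        simp [PySem.Dict.empty]))
  have hstep : (fun (st : PySem.Dict Int Int × Int) (i : Int) =>
      let count := if i > 0 ∧ (PySem.List.pyGetD S.toList i ' ').toNat > (PySem.List.pyGetD S.toList (i-1) ' ').toNat
                   then st.2 + 1 else 1
      (st.1.insert i count, count)) = pvStepA S.toList := rfl
  rw [hstep, pvValues_map, hfold]
  simp [PySem.Dict.empty, List.map_map]

theorem solution_spec : Claim_equal_solution := by
  unfold Claim_equal_solution
  intro N S _ _
  unfold Spec_solution solution_alt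
  rw [solution_eq, pvScanEq S.toList N (N - 0).toNat 0 [] le_rfl le_rfl
      (by intro _; rw [pvCountF_unfold]; rw [if_neg (by intro h; exact absurd h.1 (by omega))])]
  simp
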